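-- pv_equiv track=rewrite | github.com/pypi-data/pypi-mirror-399 | packages/melody-features/melody_features-1.1.5.tar.gz/melody_features-1.1.5/src/melody_features/feature_histogram.py | _create_folded_fifths_histogram
-- ===== SOURCE A (Python) =====
-- from typing import List, Dict, Any, Callable, Optional
--
-- def _create_folded_fifths_histogram(pitch_classes: List[int]) -> Dict[int, int]:
--     """
--     Create a folded fifths pitch class histogram.
--
--     Uses the equation B = (7a) mod 12 to reorder pitch classes
--     according to the circle of fifths.
--     """
--     pc_counts = {i: 0 for i in range(12)}
--     for pc in pitch_classes:
--         if 0 <= pc <= 11: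
--             pc_counts[pc] += 1
--
--     folded_histogram = {i: 0 for i in range(12)}
--     for original_pc in range(12):
--         folded_pc = (7 * original_pc) % 12
--         folded_histogram[folded_pc] = pc_counts[original_pc]
--
--     return folded_histogram
-- ===== SOURCE B (Python) =====
-- from typing import List, Dict
--
-- def _create_folded_fifths_histogram(pitch_classes: List[int]) -> Dict[int, int]:
--     """Single pass: accumulate each in-range pitch class directly into its
--     circle-of-fifths position (7*pc) % 12."""
--     folded_histogram = {i: 0 for i in range(12)}
--     for pc in pitch_classes:
--         if 0 <= pc <= 11:
--             folded_histogram[(7 * pc) % 12] += 1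
--     return folded_histogram
-- ===== Notes on version B (the rewrite author's own statement) =====
-- stated objective: simpler
-- what changed: Drops the intermediate pc_counts dict and the second range(12) remap loop: one pass accumulates each in-range pitch class directly into its folded position (7*pc)%12 of a pre-initialised histogram.
import Mathlib
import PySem

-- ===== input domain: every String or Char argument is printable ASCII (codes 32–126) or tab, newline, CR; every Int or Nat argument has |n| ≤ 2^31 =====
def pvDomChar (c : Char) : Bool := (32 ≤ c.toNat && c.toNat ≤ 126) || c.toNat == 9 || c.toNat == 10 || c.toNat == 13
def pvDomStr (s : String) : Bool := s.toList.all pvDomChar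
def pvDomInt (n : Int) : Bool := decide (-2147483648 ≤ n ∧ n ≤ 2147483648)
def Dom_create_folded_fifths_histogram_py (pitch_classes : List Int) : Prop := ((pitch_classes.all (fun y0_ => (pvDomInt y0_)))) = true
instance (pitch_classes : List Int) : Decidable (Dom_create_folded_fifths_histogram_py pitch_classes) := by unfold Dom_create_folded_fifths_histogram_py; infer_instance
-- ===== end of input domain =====

-- B replaces A's count-then-remap (two dicts, a second range(12) loop) by one pass that
-- accumulates each in-range pitch class directly into its folded slot (7*pc) % 12 — simpler.


-- ===== PORT A =====
def create_folded_fifths_histogram_py (pitch_classes : List Int) : List (Int × Int) :=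
  -- pc_counts = {i: 0 for i in range(12)}
  let pc_counts0 : PySem.Dict Int Int :=
    (PySem.List.pyRange 0 12 1).foldl (fun d i => d.insert i 0) PySem.Dict.empty
  -- for pc in pitch_classes: if 0 <= pc <= 11: pc_counts[pc] += 1
  let pc_counts :=
    pitch_classes.foldl
      (fun d pc => if 0 ≤ pc ∧ pc ≤ 11 then d.insert pc (d.getD pc 0 + 1) else d) pc_counts0
  -- folded_histogram = {i: 0 for i in range(12)}
  let folded0 : PySem.Dict Int Int :=
    (PySem.List.pyRange 0 12 1).foldl (fun d i => d.insert i 0) PySem.Dict.empty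
  -- for original_pc in range(12): folded_histogram[(7*original_pc)%12] = pc_counts[original_pc]
  let folded :=
    (PySem.List.pyRange 0 12 1).foldl
      (fun d original_pc =>
        d.insert (PySem.Int.mod (7 * original_pc) 12) (pc_counts.getD original_pc 0))
      folded0
  folded.items

-- ===== PORT B =====
def create_folded_fifths_histogram_py_alt (pitch_classes : List Int) : List (Int × Int) :=
  -- folded_histogram = {i: 0 for i in range(12)}
  let folded0 : PySem.Dict Int Int :=
    (PySem.List.pyRange 0 12 1).foldl (fun d i => d.insert i 0) PySem.Dict.empty
  -- for pc in pitch_classes: if 0 <= pc <= 11: folded_histogram[(7*pc)%12] += 1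
  (pitch_classes.foldl
    (fun d pc =>
      if 0 ≤ pc ∧ pc ≤ 11 then d.modify (PySem.Int.mod (7 * pc) 12) 0 (· + 1) else d)
    folded0).items

-- ===== PRECONDITION & SPEC =====
def Spec_create_folded_fifths_histogram_py (pitch_classes : List Int) (out : List (Int × Int)) : Prop := out = create_folded_fifths_histogram_py_alt pitch_classes
instance (pitch_classes : List Int) (out : List (Int × Int)) : Decidable (Spec_create_folded_fifths_histogram_py pitch_classes out) := by unfold Spec_create_folded_fifths_histogram_py; infer_instance

-- ===== CLAIM (what is proved, stated in full; the proofs are below) =====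
def Claim_equal_create_folded_fifths_histogram_py : Prop := ∀ (pitch_classes : List Int), Dom_create_folded_fifths_histogram_py pitch_classes → Spec_create_folded_fifths_histogram_py pitch_classes (create_folded_fifths_histogram_py pitch_classes)

-- ===== LEMMAS AND PROOFS =====

-- the initial {i: 0 for i in range(12)} dict, shared by both ports
def pvInit12 : PySem.Dict Int Int :=
  (PySem.List.pyRange 0 12 1).foldl (fun d i => d.insert i 0) PySem.Dict.empty

theorem pvInit12_keys : pvInit12.keys = [0, 1, 2, 3, 4, 5, 6, 7, 8, 9, 10, 11] := rfl

theorem pvInit12_getD (k : Int) : pvInit12.getD k 0 = 0 := by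
  by_cases h0 : k = 0; · subst h0; rfl
  by_cases h1 : k = 1; · subst h1; rfl
  by_cases h2 : k = 2; · subst h2; rfl
  by_cases h3 : k = 3; · subst h3; rfl
  by_cases h4 : k = 4; · subst h4; rfl
  by_cases h5 : k = 5; · subst h5; rfl
  by_cases h6 : k = 6; · subst h6; rfl
  by_cases h7 : k = 7; · subst h7; rfl
  by_cases h8 : k = 8; · subst h8; rfl
  by_cases h9 : k = 9; · subst h9; rfl
  by_cases h10 : k = 10; · subst h10; rfl
  by_cases h11 : k = 11; · subst h11; rfl
  have hc : pvInit12.contains k = false := by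
    rw [PySem.Dict.contains_eq_decide_mem_keys, pvInit12_keys]
    simp [h0, h1, h2, h3, h4, h5, h6, h7, h8, h9, h10, h11]
  exact PySem.Dict.getD_of_not_contains _ _ hc

-- a guarded fold is a fold over the filtered list
theorem foldl_guard {α : Type} (l : List Int) (f : α → Int → α) (d : α) :
    l.foldl (fun acc pc => if 0 ≤ pc ∧ pc ≤ 11 then f acc pc else acc) d
    = (l.filter (fun pc => decide (0 ≤ pc ∧ pc ≤ 11))).foldl f d := by
  rw [List.foldl_filter]; simp

-- A's remap loop, fully evaluated over the literal range (keys are literals)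
set_option maxHeartbeats 1000000 in
theorem A_fold_items (c : PySem.Dict Int Int) :
    ((PySem.List.pyRange 0 12 1).foldl
      (fun d a => d.insert (PySem.Int.mod (7 * a) 12) (c.getD a 0)) pvInit12).items
    = [(0, c.getD 0 0), (1, c.getD 7 0), (2, c.getD 2 0), (3, c.getD 9 0),
       (4, c.getD 4 0), (5, c.getD 11 0), (6, c.getD 6 0), (7, c.getD 1 0),
       (8, c.getD 8 0), (9, c.getD 3 0), (10, c.getD 10 0), (11, c.getD 5 0)] := by
  simp [pvInit12, show PySem.List.pyRange 0 12 1 = [0, 1, 2, 3, 4, 5, 6, 7, 8, 9, 10, 11] from rfl,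
    PySem.Dict.insert, PySem.Dict.empty, PySem.Int.mod]

-- folding pc ↦ (7*pc) % 12 is injective on 0..11: counts of folded keys are counts of originals
theorem count_map_key (F : List Int) (hF : ∀ pc ∈ F, 0 ≤ pc ∧ pc ≤ 11)
    (a : Int) (ha0 : 0 ≤ a) (ha1 : a ≤ 11) :
    (F.map (fun pc => PySem.Int.mod (7 * pc) 12)).count (PySem.Int.mod (7 * a) 12)
    = F.count a := by
  rw [List.count_eq_countP, List.countP_map, List.count_eq_countP]
  refine List.countP_congr ?_
  intro pc hpc
  obtain ⟨h0, h1⟩ := hF pc hpc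
  have hm1 : PySem.Int.mod (7 * pc) 12 = (7 * pc) % 12 :=
    PySem.Int.mod_eq_emod_of_pos (by norm_num)
  have hm2 : PySem.Int.mod (7 * a) 12 = (7 * a) % 12 :=
    PySem.Int.mod_eq_emod_of_pos (by norm_num)
  simp only [Function.comp, beq_iff_eq, hm1, hm2]
  omega

-- B's accumulation fold: the value at each key is the key's count
theorem B_getD (m : List Int) (k : Int) :
    ((m.foldl (fun d x => d.modify x 0 (· + 1)) pvInit12).getD k 0) = m.count k := by
  rw [PySem.Dict.getD_foldl_modify_add_one, pvInit12_getD, zero_add]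

-- B's accumulation fold leaves the keys [0..11] unchanged
theorem B_keys (m : List Int) (hm : ∀ x ∈ m, 0 ≤ x ∧ x ≤ 11) :
    (m.foldl (fun d x => d.modify x 0 (· + 1)) pvInit12).keys = pvInit12.keys := by
  rw [PySem.Dict.keys_foldl_modify m 0 (fun _ _ => (· + 1)) pvInit12,
    PySem.Set.update_eq_append_filter]
  have hnil : (PySem.Set.ofList m).filter (fun y => !(PySem.Set.contains pvInit12.keys y)) = [] := by
    rw [List.filter_eq_nil_iff]
    intro y hy
    obtain ⟨h0, h1⟩ := hm y ((PySem.Set.mem_ofList m y).mp hy)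
    have hmem : y ∈ pvInit12.keys := by
      rw [pvInit12_keys]; interval_cases y <;> simp
    simp only [Bool.not_eq_eq_eq_not, Bool.not_true]
    rw [← Bool.not_eq_true, (PySem.Set.contains_iff pvInit12.keys y)]
    simp [hmem]
  rw [hnil, List.append_nil]

set_option maxHeartbeats 1000000 in
theorem create_folded_fifths_histogram_py_spec : Claim_equal_create_folded_fifths_histogram_py := by
  intro pcs _
  unfold Spec_create_folded_fifths_histogram_py
  unfold create_folded_fifths_histogram_py create_folded_fifths_histogram_py_alt
  simp only []
  rw [show ((PySem.List.pyRange 0 12 1).foldl (fun d i => d.insert i 0) PySem.Dict.empty : PySem.Dict Int Int) = pvInit12 from rfl]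
  rw [foldl_guard pcs (fun d pc => d.insert pc (d.getD pc 0 + 1)) pvInit12,
    foldl_guard pcs (fun d pc => d.modify (PySem.Int.mod (7 * pc) 12) 0 (· + 1)) pvInit12,
    A_fold_items]
  set F := pcs.filter (fun pc => decide (0 ≤ pc ∧ pc ≤ 11)) with hFdef
  have hFmem : ∀ pc ∈ F, 0 ≤ pc ∧ pc ≤ 11 := by
    intro pc hpc
    simpa using List.of_mem_filter hpc
  rw [show F.foldl (fun d pc => d.modify (PySem.Int.mod (7 * pc) 12) 0 (· + 1)) pvInit12
      = (F.map (fun pc => PySem.Int.mod (7 * pc) 12)).foldl (fun d x => d.modify x 0 (· + 1)) pvInit12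
    from (List.foldl_map (f := fun pc => PySem.Int.mod (7 * pc) 12)
      (g := fun d x => d.modify x 0 (· + 1)) (l := F) (init := pvInit12)).symm]
  set m := F.map (fun pc => PySem.Int.mod (7 * pc) 12) with hmdef
  have hmmem : ∀ x ∈ m, 0 ≤ x ∧ x ≤ 11 := by
    intro x hx
    rw [hmdef] at hx
    obtain ⟨pc, _, rfl⟩ := List.mem_map.mp hx
    refine ⟨PySem.Int.mod_nonneg _ (by norm_num), ?_⟩
    have := PySem.Int.mod_lt (7 * pc) (b := 12) (by norm_num)
    omega
  have hkeys := B_keys m hmmem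
  have hnodup : ((m.foldl (fun d x => d.modify x 0 (· + 1)) pvInit12).keys).Nodup := by
    rw [hkeys, pvInit12_keys]; decide
  rw [PySem.Dict.items_eq_map_keys _ hnodup 0, hkeys, pvInit12_keys]
  simp only [List.map_cons, List.map_nil]
  have hc : ∀ a : Int,
      (F.foldl (fun d pc => d.insert pc (d.getD pc 0 + 1)) pvInit12).getD a 0 = F.count a := by
    intro a
    rw [PySem.Dict.getD_foldl_insert_add_one, pvInit12_getD, zero_add]
  have he : ∀ a k : Int, 0 ≤ a → a ≤ 11 → PySem.Int.mod (7 * a) 12 = k →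
      (F.foldl (fun d pc => d.insert pc (d.getD pc 0 + 1)) pvInit12).getD a 0
      = (m.foldl (fun d x => d.modify x 0 (· + 1)) pvInit12).getD k 0 := by
    intro a k ha0 ha1 hk
    rw [hc a, B_getD, hmdef, ← hk, count_map_key F hFmem a ha0 ha1]
  rw [he 0 0 (by norm_num) (by norm_num) rfl, he 7 1 (by norm_num) (by norm_num) rfl,
    he 2 2 (by norm_num) (by norm_num) rfl, he 9 3 (by norm_num) (by norm_num) rfl,
    he 4 4 (by norm_num) (by norm_num) rfl, he 11 5 (by norm_num) (by norm_num) rfl,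
    he 6 6 (by norm_num) (by norm_num) rfl, he 1 7 (by norm_num) (by norm_num) rfl,
    he 8 8 (by norm_num) (by norm_num) rfl, he 3 9 (by norm_num) (by norm_num) rfl,
    he 10 10 (by norm_num) (by norm_num) rfl, he 5 11 (by norm_num) (by norm_num) rfl]
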